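-- pv_equiv track=rewrite | github.com/SeyoungKimLab/Ornaments | create_personalized_transcriptome.py | apply_all_indels
-- ===== SOURCE A (Python) =====
-- def apply_all_indels(ref, insDict, delDict):
--   to_ret = ref
--   transformed_coords_ins = {i: i for i in insDict}
--   transformed_coords_del = {d: d for d in delDict}
--   for i in insDict:
--     ind = transformed_coords_ins[i]
--     len_ins = len(insDict[i]) - 1
--     to_ret = to_ret[:ind+1] + insDict[i][1:] + to_ret[ind+1:]
--     for j in insDict:
--       if transformed_coords_ins[j] > ind:
--         transformed_coords_ins[j] += len_ins
--     for j in delDict: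
--       if transformed_coords_del[j] > ind:
--         transformed_coords_del[j] += len_ins
--   for d in delDict:
--     len_del = abs(delDict[d])
--     ind = transformed_coords_del[d]
--     to_ret = to_ret[:ind+1] + '-' * len_del + to_ret[ind+len_del+1:]
--   return to_ret.replace('-','')
-- ===== SOURCE B (Python) =====
-- def apply_all_indels(ref, insDict, delDict):
--     # Lazy coordinate transformation: instead of keeping (and eagerly
--     # rewriting) a dict of transformed coordinates for every key after each
--     # insertion, record each applied insertion as an event (position, shift)
--     # and compute any coordinate on demand by folding the event log.
--     events = []
--
--     def tf(c):
--         for ind, shift in events: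
--             if c > ind:
--                 c += shift
--         return c
--
--     s = ref
--     for pos, text in insDict.items():
--         ind = tf(pos)
--         s = s[:ind + 1] + text[1:] + s[ind + 1:]
--         events.append((ind, len(text) - 1))
--     for pos, ld in delDict.items():
--         ind = tf(pos)
--         n = abs(ld)
--         s = s[:ind + 1] + '-' * n + s[ind + n + 1:]
--     return s.replace('-', '')
-- ===== Notes on version B (the rewrite author's own statement) =====
-- stated objective: alternative
-- what changed: B drops both transformed-coordinate dicts and the two inner rewrite loops A runs after every insertion; instead it keeps an append-only log of applied insertion events (position, shift) and computes any coordinate on demand by folding the log, applying deletions straight from it.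
import Mathlib
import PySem

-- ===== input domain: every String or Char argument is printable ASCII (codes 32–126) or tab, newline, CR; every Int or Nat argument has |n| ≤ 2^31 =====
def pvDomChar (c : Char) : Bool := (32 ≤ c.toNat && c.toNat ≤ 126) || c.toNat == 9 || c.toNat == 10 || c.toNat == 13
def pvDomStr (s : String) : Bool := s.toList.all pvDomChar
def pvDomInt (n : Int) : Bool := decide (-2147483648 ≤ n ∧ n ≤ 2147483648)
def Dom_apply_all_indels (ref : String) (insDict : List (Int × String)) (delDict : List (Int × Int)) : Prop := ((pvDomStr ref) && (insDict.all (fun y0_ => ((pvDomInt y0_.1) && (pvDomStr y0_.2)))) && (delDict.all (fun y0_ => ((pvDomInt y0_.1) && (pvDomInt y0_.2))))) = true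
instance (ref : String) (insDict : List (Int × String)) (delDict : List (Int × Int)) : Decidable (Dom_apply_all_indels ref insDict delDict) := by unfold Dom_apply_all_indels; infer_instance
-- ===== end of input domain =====

-- B replaces A's eagerly-rewritten transformed-coordinate dicts by an append-only
-- event log folded on demand (alternative decomposition, same asymptotic cost).

-- ===== PORT A =====
def apply_all_indels (ref : String) (insDict : List (Int × String)) (delDict : List (Int × Int)) : String :=
  -- transformed_coords_ins = {i: i for i in insDict}; transformed_coords_del = {d: d for d in delDict}
  let tci0 : PySem.Dict Int Int := insDict.foldl (fun d kv => d.insert kv.1 kv.1) PySem.Dict.empty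
  let tcd0 : PySem.Dict Int Int := delDict.foldl (fun d kv => d.insert kv.1 kv.1) PySem.Dict.empty
  -- for i in insDict: …  (state: to_ret, transformed_coords_ins, transformed_coords_del)
  let st := insDict.foldl (fun (st : List Char × PySem.Dict Int Int × PySem.Dict Int Int) kv =>
      let ind : Int := (st.2.1.get? kv.1).getD 0
      let lenIns : Int := (kv.2.toList.length : Int) - 1
      (PySem.List.slice st.1 none (some (ind + 1)) ++ PySem.List.slice kv.2.toList (some 1) none ++ PySem.List.slice st.1 (some (ind + 1)) none,
       insDict.foldl (fun d j => if (d.get? j.1).getD 0 > ind then d.insert j.1 ((d.get? j.1).getD 0 + lenIns) else d) st.2.1,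
       delDict.foldl (fun d j => if (d.get? j.1).getD 0 > ind then d.insert j.1 ((d.get? j.1).getD 0 + lenIns) else d) st.2.2))
    (ref.toList, tci0, tcd0)
  -- for d in delDict: …
  let s2 := delDict.foldl (fun s kv =>
      let lenDel : Int := |kv.2|
      let ind : Int := (st.2.2.get? kv.1).getD 0
      PySem.List.slice s none (some (ind + 1)) ++ List.replicate lenDel.toNat '-' ++ PySem.List.slice s (some (ind + lenDel + 1)) none) st.1
  PySem.Str.replace (String.ofList s2) "-" ""

-- ===== PORT B =====
-- tf(c): fold the event log over a coordinate
def pvTransform (events : List (Int × Int)) (c : Int) : Int :=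
  events.foldl (fun c e => if c > e.1 then c + e.2 else c) c

def apply_all_indels_alt (ref : String) (insDict : List (Int × String)) (delDict : List (Int × Int)) : String :=
  -- insertion pass: state is (s, events); each step appends one event
  let st := insDict.foldl (fun (st : List Char × List (Int × Int)) kv =>
      let ind : Int := pvTransform st.2 kv.1
      (PySem.List.slice st.1 none (some (ind + 1)) ++ PySem.List.slice kv.2.toList (some 1) none ++ PySem.List.slice st.1 (some (ind + 1)) none,
       st.2 ++ [(ind, (kv.2.toList.length : Int) - 1)]))
    (ref.toList, [])
  -- deletion pass: coordinates read off the finished log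
  let s2 := delDict.foldl (fun s kv =>
      let ind : Int := pvTransform st.2 kv.1
      let n : Int := |kv.2|
      PySem.List.slice s none (some (ind + 1)) ++ List.replicate n.toNat '-' ++ PySem.List.slice s (some (ind + n + 1)) none) st.1
  PySem.Str.replace (String.ofList s2) "-" ""

-- ===== PRECONDITION & SPEC =====
-- Pre_ excludes only association lists with a duplicated key: they encode no Python dict
-- (Python's insDict/delDict always have distinct keys), so nothing A returns on is excluded.
def Pre_apply_all_indels (ref : String) (insDict : List (Int × String)) (delDict : List (Int × Int)) : Prop :=
  (insDict.map Prod.fst).Nodup ∧ (delDict.map Prod.fst).Nodup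
instance (ref : String) (insDict : List (Int × String)) (delDict : List (Int × Int)) : Decidable (Pre_apply_all_indels ref insDict delDict) := by unfold Pre_apply_all_indels; infer_instance

def pvWitness_apply_all_indels : String × (List (Int × String)) × (List (Int × Int)) := ("abcd", [(0, "aXY"), (2, "c!")], [(1, 2), (-1, 1)])

def Spec_apply_all_indels (ref : String) (insDict : List (Int × String)) (delDict : List (Int × Int)) (out : String) : Prop := out = apply_all_indels_alt ref insDict delDict
instance (ref : String) (insDict : List (Int × String)) (delDict : List (Int × Int)) (out : String) : Decidable (Spec_apply_all_indels ref insDict delDict out) := by unfold Spec_apply_all_indels; infer_instance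

-- ===== CLAIM (what is proved, stated in full; the proofs are below) =====
def Claim_equal_apply_all_indels : Prop := ∀ (ref : String) (insDict : List (Int × String)) (delDict : List (Int × Int)), Dom_apply_all_indels ref insDict delDict → Pre_apply_all_indels ref insDict delDict → Spec_apply_all_indels ref insDict delDict (apply_all_indels ref insDict delDict)

-- ===== LEMMAS AND PROOFS =====

-- build loop for {i: i for i in l}: every key of l maps to itself
theorem pv_build_get? {α : Type} (l : List (Int × α)) (d : PySem.Dict Int Int) (k : Int)
    (h : d.get? k = some k ∨ k ∈ l.map Prod.fst) :
    (l.foldl (fun d kv => d.insert kv.1 kv.1) d).get? k = some k := by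
  induction l generalizing d with
  | nil => simpa using h
  | cons a t ih =>
    simp only [List.foldl_cons]
    apply ih
    by_cases hk : k = a.1
    · left; subst hk; exact PySem.Dict.get?_insert_self _ _ _
    · rcases h with h | h
      · left; rw [PySem.Dict.get?_insert_of_ne _ _ hk]; exact h
      · simp only [List.map_cons, List.mem_cons] at h
        rcases h with h | h
        · exact absurd h hk
        · right; exact h

-- A's inner rewrite loop, characterised pointwise (keys nodup, all present)
theorem pv_shift_get? {α : Type} (ind L : Int) (js : List (Int × α)) (d : PySem.Dict Int Int) (k : Int)
    (hnd : (js.map Prod.fst).Nodup)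
    (hin : ∀ j ∈ js.map Prod.fst, (d.get? j).isSome) :
    (js.foldl (fun d j => if (d.get? j.1).getD 0 > ind then d.insert j.1 ((d.get? j.1).getD 0 + L) else d) d).get? k
      = if k ∈ js.map Prod.fst then
          some (if (d.get? k).getD 0 > ind then (d.get? k).getD 0 + L else (d.get? k).getD 0)
        else d.get? k := by
  induction js generalizing d with
  | nil => simp
  | cons a t ih =>
    simp only [List.map_cons, List.nodup_cons] at hnd
    obtain ⟨ha, hndt⟩ := hnd
    have hsa : (d.get? a.1).isSome := hin a.1 (by simp)
    obtain ⟨va, hva⟩ : ∃ v, d.get? a.1 = some v := Option.isSome_iff_exists.mp hsa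
    set d1 := if (d.get? a.1).getD 0 > ind then d.insert a.1 ((d.get? a.1).getD 0 + L) else d with hd1
    have hd1a : d1.get? a.1 = some (if (d.get? a.1).getD 0 > ind then (d.get? a.1).getD 0 + L else (d.get? a.1).getD 0) := by
      rw [hd1]; split_ifs with hc
      · exact PySem.Dict.get?_insert_self _ _ _
      · simp [hva]
    have hd1ne : ∀ k', k' ≠ a.1 → d1.get? k' = d.get? k' := by
      intro k' hk'
      rw [hd1]; split_ifs with hc
      · rw [PySem.Dict.get?_insert_of_ne _ _ hk']
      · rfl
    have hin1 : ∀ j ∈ t.map Prod.fst, (d1.get? j).isSome := by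
      intro j hj
      have hja : j ≠ a.1 := fun h => ha (h ▸ hj)
      rw [hd1ne j hja]; exact hin j (by simp [hj])
    simp only [List.foldl_cons, ← hd1]
    rw [ih d1 hndt hin1]
    simp only [List.map_cons, List.mem_cons]
    by_cases hk : k = a.1
    · subst hk
      rw [if_neg ha, if_pos (Or.inl rfl), hd1a]
    · rw [hd1ne k hk]
      by_cases hkt : k ∈ t.map Prod.fst
      · rw [if_pos hkt, if_pos (Or.inr hkt)]
      · rw [if_neg hkt, if_neg (by rintro (h | h); exact hk h; exact hkt h)]

theorem pv_transform_append (es : List (Int × Int)) (e : Int × Int) (c : Int) :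
    pvTransform (es ++ [e]) c = if pvTransform es c > e.1 then pvTransform es c + e.2 else pvTransform es c := by
  simp [pvTransform, List.foldl_append]

-- the insertion loops of A and B, run side by side from related states
theorem pv_loop_equiv (insDict : List (Int × String)) (delDict : List (Int × Int))
    (hni : (insDict.map Prod.fst).Nodup) (hndl : (delDict.map Prod.fst).Nodup)
    (rest : List (Int × String)) (hsub : ∀ kv ∈ rest, kv.1 ∈ insDict.map Prod.fst)
    (s : List Char) (tci tcd : PySem.Dict Int Int) (events : List (Int × Int))
    (h1 : ∀ k ∈ insDict.map Prod.fst, tci.get? k = some (pvTransform events k))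
    (h2 : ∀ k ∈ delDict.map Prod.fst, tcd.get? k = some (pvTransform events k)) :
    (rest.foldl (fun (st : List Char × PySem.Dict Int Int × PySem.Dict Int Int) kv =>
        (PySem.List.slice st.1 none (some ((st.2.1.get? kv.1).getD 0 + 1)) ++ PySem.List.slice kv.2.toList (some 1) none ++ PySem.List.slice st.1 (some ((st.2.1.get? kv.1).getD 0 + 1)) none,
         insDict.foldl (fun d j => if (d.get? j.1).getD 0 > (st.2.1.get? kv.1).getD 0 then d.insert j.1 ((d.get? j.1).getD 0 + ((kv.2.toList.length : Int) - 1)) else d) st.2.1,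
         delDict.foldl (fun d j => if (d.get? j.1).getD 0 > (st.2.1.get? kv.1).getD 0 then d.insert j.1 ((d.get? j.1).getD 0 + ((kv.2.toList.length : Int) - 1)) else d) st.2.2))
      (s, tci, tcd)).1
      = (rest.foldl (fun (st : List Char × List (Int × Int)) kv =>
          (PySem.List.slice st.1 none (some (pvTransform st.2 kv.1 + 1)) ++ PySem.List.slice kv.2.toList (some 1) none ++ PySem.List.slice st.1 (some (pvTransform st.2 kv.1 + 1)) none,
           st.2 ++ [(pvTransform st.2 kv.1, (kv.2.toList.length : Int) - 1)]))
        (s, events)).1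
    ∧ (∀ k ∈ insDict.map Prod.fst,
        (rest.foldl (fun (st : List Char × PySem.Dict Int Int × PySem.Dict Int Int) kv =>
          (PySem.List.slice st.1 none (some ((st.2.1.get? kv.1).getD 0 + 1)) ++ PySem.List.slice kv.2.toList (some 1) none ++ PySem.List.slice st.1 (some ((st.2.1.get? kv.1).getD 0 + 1)) none,
           insDict.foldl (fun d j => if (d.get? j.1).getD 0 > (st.2.1.get? kv.1).getD 0 then d.insert j.1 ((d.get? j.1).getD 0 + ((kv.2.toList.length : Int) - 1)) else d) st.2.1,
           delDict.foldl (fun d j => if (d.get? j.1).getD 0 > (st.2.1.get? kv.1).getD 0 then d.insert j.1 ((d.get? j.1).getD 0 + ((kv.2.toList.length : Int) - 1)) else d) st.2.2))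
          (s, tci, tcd)).2.1.get? k
        = some (pvTransform
            (rest.foldl (fun (st : List Char × List (Int × Int)) kv =>
              (PySem.List.slice st.1 none (some (pvTransform st.2 kv.1 + 1)) ++ PySem.List.slice kv.2.toList (some 1) none ++ PySem.List.slice st.1 (some (pvTransform st.2 kv.1 + 1)) none,
               st.2 ++ [(pvTransform st.2 kv.1, (kv.2.toList.length : Int) - 1)]))
              (s, events)).2 k))
    ∧ (∀ k ∈ delDict.map Prod.fst,
        (rest.foldl (fun (st : List Char × PySem.Dict Int Int × PySem.Dict Int Int) kv =>
          (PySem.List.slice st.1 none (some ((st.2.1.get? kv.1).getD 0 + 1)) ++ PySem.List.slice kv.2.toList (some 1) none ++ PySem.List.slice st.1 (some ((st.2.1.get? kv.1).getD 0 + 1)) none,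
           insDict.foldl (fun d j => if (d.get? j.1).getD 0 > (st.2.1.get? kv.1).getD 0 then d.insert j.1 ((d.get? j.1).getD 0 + ((kv.2.toList.length : Int) - 1)) else d) st.2.1,
           delDict.foldl (fun d j => if (d.get? j.1).getD 0 > (st.2.1.get? kv.1).getD 0 then d.insert j.1 ((d.get? j.1).getD 0 + ((kv.2.toList.length : Int) - 1)) else d) st.2.2))
          (s, tci, tcd)).2.2.get? k
        = some (pvTransform
            (rest.foldl (fun (st : List Char × List (Int × Int)) kv =>
              (PySem.List.slice st.1 none (some (pvTransform st.2 kv.1 + 1)) ++ PySem.List.slice kv.2.toList (some 1) none ++ PySem.List.slice st.1 (some (pvTransform st.2 kv.1 + 1)) none,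
               st.2 ++ [(pvTransform st.2 kv.1, (kv.2.toList.length : Int) - 1)]))
              (s, events)).2 k)) := by
  induction rest generalizing s tci tcd events with
  | nil => exact ⟨rfl, h1, h2⟩
  | cons a t ih =>
    have haIns : a.1 ∈ insDict.map Prod.fst := hsub a (by simp)
    have hindA : (tci.get? a.1).getD 0 = pvTransform events a.1 := by rw [h1 a.1 haIns]; rfl
    simp only [List.foldl_cons]
    have hinI : ∀ j ∈ insDict.map Prod.fst, (tci.get? j).isSome := by
      intro j hj; rw [h1 j hj]; rfl
    have hinD : ∀ j ∈ delDict.map Prod.fst, (tcd.get? j).isSome := by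
      intro j hj; rw [h2 j hj]; rfl
    rw [hindA]
    exact ih (fun kv hkv => hsub kv (by simp [hkv]))
      (PySem.List.slice s none (some (pvTransform events a.1 + 1)) ++ PySem.List.slice a.2.toList (some 1) none ++ PySem.List.slice s (some (pvTransform events a.1 + 1)) none)
      (insDict.foldl (fun d j => if (d.get? j.1).getD 0 > pvTransform events a.1 then d.insert j.1 ((d.get? j.1).getD 0 + ((a.2.toList.length : Int) - 1)) else d) tci)
      (delDict.foldl (fun d j => if (d.get? j.1).getD 0 > pvTransform events a.1 then d.insert j.1 ((d.get? j.1).getD 0 + ((a.2.toList.length : Int) - 1)) else d) tcd)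
      (events ++ [(pvTransform events a.1, (a.2.toList.length : Int) - 1)])
      (by
        intro k hk
        rw [pv_shift_get? (pvTransform events a.1) _ insDict tci k hni hinI, if_pos hk, h1 k hk]
        simp [pv_transform_append])
      (by
        intro k hk
        rw [pv_shift_get? (pvTransform events a.1) _ delDict tcd k hndl hinD, if_pos hk, h2 k hk]
        simp [pv_transform_append])

-- the deletion loops of A and B, run side by side
theorem pv_del_equiv (delDict : List (Int × Int)) (tcd : PySem.Dict Int Int) (events : List (Int × Int))
    (rest : List (Int × Int)) (hsub : ∀ kv ∈ rest, kv.1 ∈ delDict.map Prod.fst)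
    (h2 : ∀ k ∈ delDict.map Prod.fst, tcd.get? k = some (pvTransform events k)) (s : List Char) :
    rest.foldl (fun s kv =>
        PySem.List.slice s none (some ((tcd.get? kv.1).getD 0 + 1)) ++ List.replicate (|kv.2| : Int).toNat '-' ++ PySem.List.slice s (some ((tcd.get? kv.1).getD 0 + |kv.2| + 1)) none) s
      = rest.foldl (fun s kv =>
        PySem.List.slice s none (some (pvTransform events kv.1 + 1)) ++ List.replicate (|kv.2| : Int).toNat '-' ++ PySem.List.slice s (some (pvTransform events kv.1 + |kv.2| + 1)) none) s := by
  induction rest generalizing s with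
  | nil => rfl
  | cons a t ih =>
    have hind : (tcd.get? a.1).getD 0 = pvTransform events a.1 := by
      rw [h2 a.1 (hsub a (by simp))]; rfl
    simp only [List.foldl_cons, hind]
    exact ih (fun kv hkv => hsub kv (by simp [hkv])) _

-- ===== VERDICT (by name: the statement is the Claim_ definition above) =====
theorem apply_all_indels_spec : Claim_equal_apply_all_indels := by
  intro ref insDict delDict _ hpre
  obtain ⟨hni, hndl⟩ := hpre
  unfold Spec_apply_all_indels apply_all_indels apply_all_indels_alt
  have h1 : ∀ k ∈ insDict.map Prod.fst,
      (insDict.foldl (fun d kv => d.insert kv.1 kv.1) PySem.Dict.empty).get? k = some (pvTransform [] k) := by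
    intro k hk
    exact pv_build_get? insDict PySem.Dict.empty k (Or.inr hk)
  have h2 : ∀ k ∈ delDict.map Prod.fst,
      (delDict.foldl (fun d kv => d.insert kv.1 kv.1) PySem.Dict.empty).get? k = some (pvTransform [] k) := by
    intro k hk
    exact pv_build_get? delDict PySem.Dict.empty k (Or.inr hk)
  have hloop := pv_loop_equiv insDict delDict hni hndl insDict (fun kv hkv => List.mem_map_of_mem hkv)
    ref.toList _ _ [] h1 h2
  obtain ⟨hs, _, hdel⟩ := hloop
  have hdels := pv_del_equiv delDict _ _ delDict (fun kv hkv => List.mem_map_of_mem hkv) hdel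
  simp only [hs, hdels]
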